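-- pv_equiv track=rewrite | github.com/ProsodyAI/model | prosody_ssm/features.py | _simple_phonemize
-- ===== SOURCE A (Python) =====
-- def _simple_phonemize(text: str) -> list[str]:
--     """Simple fallback phonemization without external dependencies."""
--     # This is a very rough approximation for English
--     # In production, use proper phonemizer
--     phonemes = []
--     text = text.lower()
--
--     i = 0
--     while i < len(text):
--         char = text[i]
--
--         # Common digraphs
--         if i < len(text) - 1:
--             digraph = text[i:i+2]
--             if digraph in ('th', 'sh', 'ch', 'ng', 'wh'):
--                 phonemes.append(digraph)
--                 i += 2
--                 continue
--
--         if char.isalpha():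
--             phonemes.append(char)
--         elif char == ' ':
--             phonemes.append('|')  # Word boundary
--
--         i += 1
--
--     return phonemes
-- ===== SOURCE B (Python) =====
-- _DIGRAPHS = ('th', 'sh', 'ch', 'ng', 'wh')
--
--
-- def _tokenize(s):
--     """Split s into digraph / single-character tokens, digraphs taking priority."""
--     toks = []
--     while s:
--         if s[:2] in _DIGRAPHS:
--             toks.append(s[:2])
--             s = s[2:]
--         else:
--             toks.append(s[0])
--             s = s[1:]
--     return toks
--
--
-- def _simple_phonemize(text: str) -> list[str]:
--     toks = _tokenize(text.lower())
--     return [('|' if t == ' ' else t)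
--             for t in toks
--             if len(t) == 2 or t.isalpha() or t == ' ']
-- ===== Notes on version B (the rewrite author's own statement) =====
-- stated objective: simpler
-- what changed: Replaces A's single index-and-lookahead while loop with inline classification by a two-phase decomposition: a tokenizer that splits the lowered string into digraph/single-char tokens, followed by one uniform filter-map comprehension.
import Mathlib
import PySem

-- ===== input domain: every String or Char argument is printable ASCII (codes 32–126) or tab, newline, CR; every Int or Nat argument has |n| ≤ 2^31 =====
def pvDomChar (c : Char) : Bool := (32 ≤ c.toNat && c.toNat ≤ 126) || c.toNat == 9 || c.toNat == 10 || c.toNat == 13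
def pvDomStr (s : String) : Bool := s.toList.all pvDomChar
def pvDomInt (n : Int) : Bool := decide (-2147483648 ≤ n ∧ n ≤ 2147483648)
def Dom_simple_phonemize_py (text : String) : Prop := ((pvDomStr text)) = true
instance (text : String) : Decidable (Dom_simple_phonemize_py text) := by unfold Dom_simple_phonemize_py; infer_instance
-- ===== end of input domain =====

-- B replaces A's index/lookahead while loop (classification inlined in the loop) by a two-phase
-- decomposition: a tokenizer splitting the lowered text into digraph/single-char tokens, then one
-- uniform filter-map pass; objective: simpler.

-- the digraph tuple ('th', 'sh', 'ch', 'ng', 'wh'), shared by both Pythons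
def pvDigraphs : List (List Char) := [['t','h'], ['s','h'], ['c','h'], ['n','g'], ['w','h']]

def pvIsDigraph (cs : List Char) : Bool := pvDigraphs.contains cs

-- ===== PORT A =====
-- the while loop of A: i is the index, acc the phonemes list; text[i:i+2] is PySem.List.slice
def phonLoopA (t : List Char) (i : Nat) (acc : List String) : List String :=
  if h : i < t.length then
    let char := t[i]
    if i < t.length - 1 ∧ pvIsDigraph (PySem.List.slice t (some (i : Int)) (some ((i : Int) + 2))) = true then
      phonLoopA t (i + 2) (acc ++ [String.ofList (PySem.List.slice t (some (i : Int)) (some ((i : Int) + 2)))])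
    else if PySem.Chars.isalpha char then
      phonLoopA t (i + 1) (acc ++ [String.ofList [char]])
    else if char = ' ' then
      phonLoopA t (i + 1) (acc ++ ["|"])
    else
      phonLoopA t (i + 1) acc
  else acc
termination_by t.length - i

def simple_phonemize_py (text : String) : List String :=
  phonLoopA (PySem.Str.lower text).toList 0 []

-- ===== PORT B =====
-- _tokenize: s[:2] is List.take 2, s[2:] / s[1:] are drops
def phonTokenize (s : List Char) : List (List Char) :=
  match s with
  | [] => []
  | c :: rest =>
    if pvIsDigraph (List.take 2 (c :: rest)) then
      List.take 2 (c :: rest) :: phonTokenize (List.drop 1 rest)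
    else
      [c] :: phonTokenize rest
termination_by s.length
decreasing_by
  all_goals (simp only [List.length_cons, List.length_drop]; omega)

-- the comprehension's filter + value, per token (t.isalpha() = nonempty ∧ all alphabetic)
def phonClassify (t : List Char) : Option String :=
  if t.length = 2 ∨ (t ≠ [] ∧ t.all PySem.Chars.isalpha) ∨ t = [' '] then
    some (if t = [' '] then "|" else String.ofList t)
  else none

def simple_phonemize_py_alt (text : String) : List String :=
  (phonTokenize (PySem.Str.lower text).toList).filterMap phonClassify

-- ===== PRECONDITION & SPEC =====
def Spec_simple_phonemize_py (text : String) (out : List String) : Prop := out = simple_phonemize_py_alt text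
instance (text : String) (out : List String) : Decidable (Spec_simple_phonemize_py text out) := by unfold Spec_simple_phonemize_py; infer_instance

-- ===== CLAIM (what is proved, stated in full; the proofs are below) =====
def Claim_equal_simple_phonemize_py : Prop := ∀ (text : String), Dom_simple_phonemize_py text → Spec_simple_phonemize_py text (simple_phonemize_py text)

-- ===== LEMMAS AND PROOFS =====

lemma pvIsDigraph_length {cs : List Char} (h : pvIsDigraph cs = true) : cs.length = 2 := by
  simp [pvIsDigraph, pvDigraphs] at h
  rcases h with h | h | h | h | h <;> subst h <;> rfl

lemma pvSlice_two (t : List Char) (i : Nat) :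
    PySem.List.slice t (some (i : Int)) (some ((i : Int) + 2)) = (t.drop i).take 2 := by
  rw [PySem.List.slice_toNat t (a := (i : Int)) (b := (i : Int) + 2) (by positivity) (by positivity)]
  have h1 : ((i : Int)).toNat = i := Int.toNat_natCast i
  have h2 : ((i : Int) + 2).toNat = i + 2 := by omega
  rw [h1, h2]
  congr 1
  omega

lemma pvClassify_two {tok : List Char} (h : tok.length = 2) :
    phonClassify tok = some (String.ofList tok) := by
  have hne : tok ≠ [' '] := by intro e; subst e; simp at h
  simp [phonClassify, h, hne]

lemma pvClassify_single (c : Char) :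
    phonClassify [c] =
      if PySem.Chars.isalpha c then some (String.ofList [c])
      else if c = ' ' then some "|" else none := by
  by_cases ha : PySem.Chars.isalpha c = true
  · have hs : c ≠ ' ' := by
      rintro rfl
      have : PySem.Chars.isalpha ' ' = false := by decide
      simp [this] at ha
    simp [phonClassify, ha, hs]
  · have hsa : PySem.Chars.isalpha ' ' = false := by decide
    by_cases hs : c = ' ' <;> simp [phonClassify, ha, hs, hsa]

lemma phonLoopA_eq (t : List Char) (i : Nat) (acc : List String) :
    phonLoopA t i acc = acc ++ (phonTokenize (t.drop i)).filterMap phonClassify := by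
  fun_induction phonLoopA t i acc with
  | case1 i acc h hd ih =>
    -- digraph branch
    obtain ⟨h1, h2⟩ := hd
    rw [ih]
    have hdrop : t.drop i = t[i] :: t.drop (i + 1) := List.drop_eq_getElem_cons h
    have htake : (t.drop i).take 2 = PySem.List.slice t (some (i : Int)) (some ((i : Int) + 2)) :=
      (pvSlice_two t i).symm
    have hlen2 : ((t.drop i).take 2).length = 2 := by
      simp [List.length_take, List.length_drop]; omega
    rw [pvSlice_two] at h2 ⊢
    have hdd : List.drop 1 (t.drop (i + 1)) = t.drop (i + 2) := by
      rw [List.drop_drop]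
    conv_rhs => rw [hdrop]
    rw [phonTokenize]
    rw [← hdrop, h2, if_pos rfl]
    rw [hdrop, hdd, ← hdrop]
    simp [pvClassify_two hlen2]
  | case2 i acc h char hd ha ih =>
    -- isalpha branch
    rw [ih]
    have hdrop : t.drop i = t[i] :: t.drop (i + 1) := List.drop_eq_getElem_cons h
    have hnd : pvIsDigraph (List.take 2 (t.drop i)) = false := by
      by_cases h1 : i < t.length - 1
      · rw [pvSlice_two] at hd
        simpa [h1] using hd
      · have : t.drop i = [t[i]] := by
          rw [hdrop]
          have : t.drop (i + 1) = [] := by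
            apply List.drop_eq_nil_of_le; omega
          rw [this]
        rw [this]
        cases hdig : pvIsDigraph (List.take 2 [t[i]])
        · rfl
        · exact absurd (pvIsDigraph_length hdig) (by simp)
    have ha' : PySem.Chars.isalpha t[i] = true := ha
    conv_rhs => rw [hdrop, phonTokenize, ← hdrop, hnd]
    simp only [Bool.false_eq_true, if_false, List.filterMap_cons, pvClassify_single]
    simp [ha']
    rfl
  | case3 i acc h char hd ha hsp ih =>
    rw [ih]
    have hdrop : t.drop i = t[i] :: t.drop (i + 1) := List.drop_eq_getElem_cons h
    have hnd : pvIsDigraph (List.take 2 (t.drop i)) = false := by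
      by_cases h1 : i < t.length - 1
      · rw [pvSlice_two] at hd
        simpa [h1] using hd
      · have he : t.drop i = [t[i]] := by
          rw [hdrop]
          have : t.drop (i + 1) = [] := by
            apply List.drop_eq_nil_of_le; omega
          rw [this]
        rw [he]
        cases hdig : pvIsDigraph (List.take 2 [t[i]])
        · rfl
        · exact absurd (pvIsDigraph_length hdig) (by simp)
    have ha' : PySem.Chars.isalpha t[i] = true → False := fun hc => ha hc
    have hsp' : t[i] = ' ' := hsp
    conv_rhs => rw [hdrop, phonTokenize, ← hdrop, hnd]
    simp only [Bool.false_eq_true, if_false, List.filterMap_cons, pvClassify_single]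
    simp [hsp']
    rw [if_neg (by decide : ¬ PySem.Chars.isalpha ' ' = true)]
  | case4 i acc h char hd ha hsp ih =>
    rw [ih]
    have hdrop : t.drop i = t[i] :: t.drop (i + 1) := List.drop_eq_getElem_cons h
    have hnd : pvIsDigraph (List.take 2 (t.drop i)) = false := by
      by_cases h1 : i < t.length - 1
      · rw [pvSlice_two] at hd
        simpa [h1] using hd
      · have he : t.drop i = [t[i]] := by
          rw [hdrop]
          have : t.drop (i + 1) = [] := by
            apply List.drop_eq_nil_of_le; omega
          rw [this]
        rw [he]
        cases hdig : pvIsDigraph (List.take 2 [t[i]])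
        · rfl
        · exact absurd (pvIsDigraph_length hdig) (by simp)
    have ha' : PySem.Chars.isalpha t[i] = true → False := fun hc => ha hc
    have hsp' : t[i] = ' ' → False := fun hc => hsp hc
    conv_rhs => rw [hdrop, phonTokenize, ← hdrop, hnd]
    simp only [Bool.false_eq_true, if_false, List.filterMap_cons, pvClassify_single]
    rw [if_neg ha', if_neg hsp']
  | case5 i acc h =>
    have : t.drop i = [] := List.drop_eq_nil_of_le (by omega)
    simp [this, phonTokenize]

theorem simple_phonemize_py_spec : Claim_equal_simple_phonemize_py := by
  intro text _
  show simple_phonemize_py text = simple_phonemize_py_alt text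
  simp [simple_phonemize_py, simple_phonemize_py_alt, phonLoopA_eq]
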